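-- pv_equiv track=rewrite | github.com/raeyoungii/baekjoon | 프로그래머스/월간 코드 챌린지 시즌1/두 번째 대회/프로그래밍4.py | solution
-- ===== SOURCE A (Python) =====
-- def solution(s):
--     answer = 0
--     for i in range(len(s)):
--         tmp = 0
--         for j in range(i, len(s)):
--             if s[i] != s[j]:
--                 tmp = j - i
--                 answer += tmp
--             else:
--                 answer += tmp
--     return answer
-- ===== SOURCE B (Python) =====
-- def solution(s):
--     # Per-character backward suffix-sum scheme: O(|distinct chars| * n) instead of A's O(n^2).
--     n = len(s)
--     total = 0
--     for c in dict.fromkeys(s):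
--         # backward pass: rows[j] = (nd, w) where nd = first index >= j with s[nd] != c (n if none)
--         # and w = sum over k >= j with s[k] != c of k * (run length of k's tmp-value)
--         nd, w = n, 0
--         rows = []
--         for j in range(n - 1, -1, -1):
--             if s[j] != c:
--                 w += j * (nd - j)
--                 nd = j
--             rows.append((nd, w))
--         rows.reverse()
--         for i in range(n):
--             if s[i] == c:
--                 nd_i, w_i = rows[i]
--                 total += w_i - i * (n - nd_i)
--     return total
-- ===== Notes on version B (the rewrite author's own statement) =====
-- stated objective: faster
-- what changed: A's O(n^2) double loop (for each anchor i, a forward scan accumulating the last differing offset tmp) is replaced by one O(n) backward pass per distinct character that builds next-differing-index and weighted suffix-sum tables, from which each anchor's total is read off in O(1), giving O(|distinct chars|*n).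
import Mathlib
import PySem

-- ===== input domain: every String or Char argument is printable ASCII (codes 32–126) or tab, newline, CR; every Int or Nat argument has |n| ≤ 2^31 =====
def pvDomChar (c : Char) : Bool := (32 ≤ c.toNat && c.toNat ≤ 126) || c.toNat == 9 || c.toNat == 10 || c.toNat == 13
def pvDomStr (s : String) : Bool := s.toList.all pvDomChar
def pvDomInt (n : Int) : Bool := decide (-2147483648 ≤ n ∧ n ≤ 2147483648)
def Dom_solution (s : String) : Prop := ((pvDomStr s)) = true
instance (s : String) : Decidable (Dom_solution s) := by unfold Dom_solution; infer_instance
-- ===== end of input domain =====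

-- B replaces A's quadratic tmp-accumulating double loop by one backward suffix-sum pass per
-- distinct character; proved to return the same value on every string.

-- ===== PORT A =====
def solution (s : String) : Int :=
  (PySem.List.pyRange 0 (PySem.Str.len s) 1).foldl
    (fun answer i =>
      ((PySem.List.pyRange i (PySem.Str.len s) 1).foldl
        (fun (st : Int × Int) j =>
          if PySem.Str.pyGet? s i ≠ PySem.Str.pyGet? s j then (j - i, st.2 + (j - i))
          else (st.1, st.2 + st.1))
        (0, answer)).2)
    0

-- ===== PORT B =====
-- rows is built by consing while j descends (= Source B's append-then-reverse);
-- rows[i] is read with pyGet? plus a default that is never used (i is always in range).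
def solution_alt (s : String) : Int :=
  (PySem.List.dedup s.toList).foldl
    (fun total c =>
      let n : Int := PySem.Str.len s
      let st := (PySem.List.pyRange (n - 1) (-1) (-1)).foldl
        (fun (st : Int × Int × List (Int × Int)) j =>
          if PySem.Str.pyGet? s j ≠ some c then
            (j, st.2.1 + j * (st.1 - j), (j, st.2.1 + j * (st.1 - j)) :: st.2.2)
          else (st.1, st.2.1, (st.1, st.2.1) :: st.2.2))
        (n, 0, [])
      (PySem.List.pyRange 0 n 1).foldl
        (fun total i =>
          if PySem.Str.pyGet? s i = some c then
            let r := (PySem.List.pyGet? st.2.2 i).getD (0, 0)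
            total + (r.2 - i * (n - r.1))
          else total)
        total)
    0

-- ===== PRECONDITION & SPEC =====
def Spec_solution (s : String) (out : Int) : Prop := out = solution_alt s
instance (s : String) (out : Int) : Decidable (Spec_solution s out) := by unfold Spec_solution; infer_instance

-- ===== CLAIM (what is proved, stated in full; the proofs are below) =====
def Claim_equal_solution : Prop := ∀ (s : String), Dom_solution s → Spec_solution s (solution s)

-- ===== LEMMAS AND PROOFS =====

-- s[k] for a Nat index (blocks simp from unfolding getD)
def pvGet (l : List Char) (k : Nat) : Char := l.getD k ' '

-- first index ≥ j whose character differs from c (l.length if none)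
def pvNd (l : List Char) (c : Char) (j : Nat) : Nat :=
  if h : j < l.length then (if pvGet l j ≠ c then j else pvNd l c (j + 1)) else l.length
termination_by l.length - j

-- Σ_{k∈[t,n), l[k]≠c} (k - i)·(pvNd (k+1) - k): the common midpoint both programs reach
def pvW (l : List Char) (c : Char) (i : Int) (t : Nat) : Int :=
  ∑ k ∈ Finset.Ico t l.length,
    (if pvGet l k ≠ c then ((k : Int) - i) * ((pvNd l c (k + 1) : Int) - (k : Int)) else 0)

-- the rows list B's backward pass builds, characterised by index
def pvRows (l : List Char) (c : Char) (t : Nat) : List (Int × Int) :=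
  (List.range' t (l.length - t)).map (fun u => ((pvNd l c u : Int), pvW l c 0 u))

theorem pvStrGet (s : String) (t : Nat) (h : t < s.toList.length) :
    PySem.Str.pyGet? s (t : Int) = some (pvGet s.toList t) := by
  simp [pvGet, List.getD_eq_getElem?_getD, List.getElem?_eq_getElem h]

theorem pvLen (s : String) : PySem.Str.len s = (s.toList.length : Int) := by
  simp [PySem.Str.len_eq]

theorem pvNd_of_ge (l : List Char) (c : Char) (j : Nat) (h : l.length ≤ j) : pvNd l c j = l.length := by
  rw [pvNd]; simp [Nat.not_lt.mpr h]

theorem pvNd_of_diff (l : List Char) (c : Char) (j : Nat) (h : j < l.length) (hd : pvGet l j ≠ c) :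
    pvNd l c j = j := by rw [pvNd]; simp only [dif_pos h, if_pos hd]

theorem pvNd_of_eq (l : List Char) (c : Char) (j : Nat) (h : j < l.length) (hd : pvGet l j = c) :
    pvNd l c j = pvNd l c (j + 1) := by
  rw [pvNd]; simp only [dif_pos h, ne_eq, hd, not_true_eq_false, if_false]

theorem pvW_of_ge (l : List Char) (c : Char) (i : Int) (t : Nat) (h : l.length ≤ t) : pvW l c i t = 0 := by
  unfold pvW; rw [Finset.Ico_eq_empty (by simpa using h)]; simp

theorem pvW_step (l : List Char) (c : Char) (i : Int) (t : Nat) (h : t < l.length) :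
    pvW l c i t = (if pvGet l t ≠ c then ((t : Int) - i) * ((pvNd l c (t + 1) : Int) - (t : Int)) else 0)
      + pvW l c i (t + 1) := by
  unfold pvW; rw [Finset.sum_eq_sum_Ico_succ_bot h]

-- the run lengths of the differing positions tile [pvNd t, n)
theorem pvR_eq (l : List Char) (c : Char) :
    ∀ m t, t + m = l.length →
    (∑ k ∈ Finset.Ico t l.length, (if pvGet l k ≠ c then ((pvNd l c (k + 1) : Int) - (k : Int)) else 0))
      = (l.length : Int) - (pvNd l c t : Int) := by
  intro m
  induction m with
  | zero => intro t ht; rw [Finset.Ico_eq_empty (by omega), pvNd_of_ge l c t (by omega)]; simp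
  | succ m ih =>
    intro t ht
    have hlt : t < l.length := by omega
    rw [Finset.sum_eq_sum_Ico_succ_bot hlt, ih (t + 1) (by omega)]
    by_cases hd : pvGet l t = c
    · rw [pvNd_of_eq l c t hlt hd, if_neg (by simpa using hd)]; ring
    · rw [pvNd_of_diff l c t hlt hd, if_pos hd]; ring

theorem pvW_shift (l : List Char) (c : Char) (i : Int) (t : Nat) (ht : t ≤ l.length) :
    pvW l c i t = pvW l c 0 t - i * ((l.length : Int) - (pvNd l c t : Int)) := by
  rw [← pvR_eq l c (l.length - t) t (by omega)]
  unfold pvW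
  rw [Finset.mul_sum, ← Finset.sum_sub_distrib]
  apply Finset.sum_congr rfl
  intro k _
  by_cases hd : pvGet l k = c
  · rw [if_neg (by simpa using hd), if_neg (by simpa using hd), if_neg (by simpa using hd)]; ring
  · rw [if_pos hd, if_pos hd, if_pos hd]; ring

-- A's inner loop: forward tmp accumulation from index t equals the regrouped sum pvW
theorem pvInnerA (s : String) (c : Char) (i : Int) (hc : PySem.Str.pyGet? s i = some c) :
    ∀ m t, t + m = s.toList.length → ∀ tmp acc : Int,
    ((PySem.List.pyRange (t : Int) (PySem.Str.len s) 1).foldl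
      (fun (st : Int × Int) j =>
        if PySem.Str.pyGet? s i ≠ PySem.Str.pyGet? s j then (j - i, st.2 + (j - i))
        else (st.1, st.2 + st.1))
      (tmp, acc)).2
    = acc + tmp * ((pvNd s.toList c t : Int) - (t : Int)) + pvW s.toList c i t := by
  intro m
  induction m with
  | zero =>
    intro t ht tmp acc
    rw [pvLen, PySem.List.pyRange_one_eq_nil (by omega)]
    rw [pvNd_of_ge _ _ _ (by omega), pvW_of_ge _ _ _ _ (by omega)]
    have : ((s.toList.length : Int)) = (t : Int) := by omega
    rw [this]; simp
  | succ m ih =>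
    intro t ht tmp acc
    have hlt : t < s.toList.length := by omega
    have hcons : PySem.List.pyRange (t : Int) (PySem.Str.len s) 1
        = (t : Int) :: PySem.List.pyRange ((t : Int) + 1) (PySem.Str.len s) 1 := by
      rw [pvLen]; exact PySem.List.pyRange_one_cons (by omega)
    rw [hcons, List.foldl_cons, hc, pvStrGet s t hlt]
    by_cases hd : pvGet s.toList t = c
    · rw [if_neg (by simp [hd])]
      have hih := ih (t + 1) (by omega) tmp (acc + tmp)
      rw [hc] at hih
      push_cast at hih ⊢
      rw [hih, pvNd_of_eq _ _ _ hlt hd, pvW_step _ _ _ _ hlt, if_neg (by simpa using hd)]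
      ring
    · rw [if_pos (by simp; exact fun h => hd h.symm)]
      have hih := ih (t + 1) (by omega) ((t : Int) - i) (acc + ((t : Int) - i))
      rw [hc] at hih
      push_cast at hih ⊢
      rw [hih, pvNd_of_diff _ _ _ hlt hd, pvW_step _ _ _ _ hlt, if_pos hd]
      ring

-- A's outer loop accumulates pvW for each anchor
theorem pvOuterA (s : String) :
    ∀ m, m ≤ s.toList.length → ∀ acc : Int,
    ((PySem.List.pyRange 0 (m : Int) 1).foldl
      (fun answer i =>
        ((PySem.List.pyRange i ((s.toList.length : Nat) : Int) 1).foldl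
          (fun (st : Int × Int) j =>
            if PySem.Str.pyGet? s i ≠ PySem.Str.pyGet? s j then (j - i, st.2 + (j - i))
            else (st.1, st.2 + st.1))
          (0, answer)).2)
      acc)
    = acc + ∑ i ∈ Finset.range m, pvW s.toList (pvGet s.toList i) (i : Int) i := by
  intro m
  induction m with
  | zero => intro _ acc; rw [PySem.List.pyRange_one_eq_nil (by omega)]; simp
  | succ m ih =>
    intro hm acc
    rw [show ((m + 1 : Nat) : Int) = (m : Int) + 1 by push_cast; ring,
        PySem.List.pyRange_one_succ_right (by omega), List.foldl_append, ih (by omega) acc,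
        List.foldl_cons, List.foldl_nil]
    have hlt : m < s.toList.length := by omega
    rw [← pvLen]
    rw [pvInnerA s (pvGet s.toList m) (m : Int) (pvStrGet s m hlt) (s.toList.length - m) m (by omega) 0 _]
    rw [Finset.sum_range_succ]; ring

theorem pvA_eq (s : String) :
    solution s = ∑ i ∈ Finset.range s.toList.length, pvW s.toList (pvGet s.toList i) (i : Int) i := by
  unfold solution
  rw [pvLen]
  rw [pvOuterA s s.toList.length le_rfl 0, zero_add]

theorem pvRows_of_ge (l : List Char) (c : Char) (t : Nat) (h : l.length ≤ t) : pvRows l c t = [] := by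
  unfold pvRows; rw [Nat.sub_eq_zero_of_le h]; simp

theorem pvRows_cons (l : List Char) (c : Char) (t : Nat) (h : t < l.length) :
    pvRows l c t = ((pvNd l c t : Int), pvW l c 0 t) :: pvRows l c (t + 1) := by
  unfold pvRows
  rw [show l.length - t = (l.length - (t + 1)) + 1 by omega, List.range'_succ]
  simp

-- B's backward pass: folding from j = t-1 down to 0 carries the invariant state to index 0
theorem pvBack (s : String) (c : Char) :
    ∀ t, t ≤ s.toList.length →
    ((PySem.List.pyRange ((t : Int) - 1) (-1) (-1)).foldl
      (fun (st : Int × Int × List (Int × Int)) j =>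
        if PySem.Str.pyGet? s j ≠ some c then
          (j, st.2.1 + j * (st.1 - j), (j, st.2.1 + j * (st.1 - j)) :: st.2.2)
        else (st.1, st.2.1, (st.1, st.2.1) :: st.2.2))
      ((pvNd s.toList c t : Int), pvW s.toList c 0 t, pvRows s.toList c t))
    = ((pvNd s.toList c 0 : Int), pvW s.toList c 0 0, pvRows s.toList c 0) := by
  intro t
  induction t with
  | zero => intro _; rw [PySem.List.pyRange_neg_one_eq_nil (by omega)]; simp
  | succ t ih =>
    intro ht
    have hlt : t < s.toList.length := by omega
    rw [show ((t + 1 : Nat) : Int) - 1 = (t : Int) by push_cast; ring,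
        PySem.List.pyRange_neg_one_cons (by omega), List.foldl_cons, pvStrGet s t hlt]
    have hstep :
        (if some (pvGet s.toList t) ≠ some c then
          ((t : Int), pvW s.toList c 0 (t+1) + (t : Int) * ((pvNd s.toList c (t+1) : Int) - (t : Int)),
            ((t : Int), pvW s.toList c 0 (t+1) + (t : Int) * ((pvNd s.toList c (t+1) : Int) - (t : Int))) :: pvRows s.toList c (t+1))
        else ((pvNd s.toList c (t+1) : Int), pvW s.toList c 0 (t+1), ((pvNd s.toList c (t+1) : Int), pvW s.toList c 0 (t+1)) :: pvRows s.toList c (t+1)))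
        = ((pvNd s.toList c t : Int), pvW s.toList c 0 t, pvRows s.toList c t) := by
      by_cases hd : pvGet s.toList t = c
      · rw [if_neg (by simp [hd])]
        rw [pvNd_of_eq _ _ _ hlt hd, pvW_step _ _ 0 _ hlt, if_neg (by simpa using hd),
            pvRows_cons _ _ _ hlt, pvNd_of_eq _ _ _ hlt hd, pvW_step _ _ 0 _ hlt,
            if_neg (by simpa using hd)]
        simp
      · rw [if_pos (by simpa using hd)]
        rw [pvRows_cons _ _ _ hlt, pvNd_of_diff _ _ _ hlt hd]
        rw [pvW_step _ _ 0 _ hlt, if_pos hd]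
        norm_num
        ring
    rw [hstep]
    exact ih (by omega)

theorem pvRowsGet (l : List Char) (c : Char) (i : Nat) (h : i < l.length) :
    (PySem.List.pyGet? (pvRows l c 0) (i : Int)).getD (0, 0)
      = ((pvNd l c i : Int), pvW l c 0 i) := by
  unfold pvRows
  rw [PySem.List.pyGet?_natCast]
  rw [List.getElem?_eq_getElem (by simpa using h)]
  simp

-- B's read-out loop: each anchor i of character c contributes pvW l c i i
theorem pvSecond (s : String) (c : Char) :
    ∀ m, m ≤ s.toList.length → ∀ total : Int,
    ((PySem.List.pyRange 0 (m : Int) 1).foldl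
      (fun total i =>
        if PySem.Str.pyGet? s i = some c then
          let r := (PySem.List.pyGet? (pvRows s.toList c 0) i).getD (0, 0)
          total + (r.2 - i * (PySem.Str.len s - r.1))
        else total)
      total)
    = total + ∑ i ∈ Finset.range m,
        (if pvGet s.toList i = c then pvW s.toList (pvGet s.toList i) (i : Int) i else 0) := by
  intro m
  induction m with
  | zero => intro _ total; rw [PySem.List.pyRange_one_eq_nil (by omega)]; simp
  | succ m ih =>
    intro hm total
    rw [show ((m + 1 : Nat) : Int) = (m : Int) + 1 by push_cast; ring,
        PySem.List.pyRange_one_succ_right (by omega), List.foldl_append, ih (by omega) total,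
        List.foldl_cons, List.foldl_nil, Finset.sum_range_succ]
    have hlt : m < s.toList.length := by omega
    rw [pvStrGet s m hlt]
    by_cases hd : pvGet s.toList m = c
    · rw [if_pos (by rw [hd]), if_pos hd]
      show total + _ + ((((PySem.List.pyGet? (pvRows s.toList c 0) ((m : Nat) : Int)).getD (0, 0)).2
          - (m : Int) * (PySem.Str.len s - ((PySem.List.pyGet? (pvRows s.toList c 0) ((m : Nat) : Int)).getD (0, 0)).1))) = _
      rw [pvRowsGet s.toList c m hlt, pvLen, hd]
      rw [pvW_shift s.toList c (m : Int) m (by omega)]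
      ring
    · rw [if_neg (by simpa using hd), if_neg hd, add_zero]

-- one iteration of B's outer loop, fully evaluated
theorem pvPerChar (s : String) (c : Char) (total : Int) :
    (fun total c =>
      let n : Int := PySem.Str.len s
      let st := (PySem.List.pyRange (n - 1) (-1) (-1)).foldl
        (fun (st : Int × Int × List (Int × Int)) j =>
          if PySem.Str.pyGet? s j ≠ some c then
            (j, st.2.1 + j * (st.1 - j), (j, st.2.1 + j * (st.1 - j)) :: st.2.2)
          else (st.1, st.2.1, (st.1, st.2.1) :: st.2.2))
        (n, 0, [])
      (PySem.List.pyRange 0 n 1).foldl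
        (fun total i =>
          if PySem.Str.pyGet? s i = some c then
            let r := (PySem.List.pyGet? st.2.2 i).getD (0, 0)
            total + (r.2 - i * (n - r.1))
          else total)
        total) total c
    = total + ∑ i ∈ Finset.range s.toList.length,
        (if pvGet s.toList i = c then pvW s.toList (pvGet s.toList i) (i : Int) i else 0) := by
  dsimp only
  have hinit : ((PySem.Str.len s : Int), (0 : Int), ([] : List (Int × Int)))
      = ((pvNd s.toList c s.toList.length : Int), pvW s.toList c 0 s.toList.length,
          pvRows s.toList c s.toList.length) := by
    rw [pvNd_of_ge _ _ _ le_rfl, pvW_of_ge _ _ _ _ le_rfl, pvRows_of_ge _ _ _ le_rfl, pvLen]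
  rw [show PySem.Str.len s - 1 = ((s.toList.length : Nat) : Int) - 1 by rw [pvLen]]
  rw [hinit, pvBack s c s.toList.length le_rfl]
  rw [show PySem.Str.len s = ((s.toList.length : Nat) : Int) from pvLen s]
  rw [← pvLen]
  exact pvSecond s c s.toList.length le_rfl total

-- B's outer loop sums the per-character totals
theorem pvOuterB (s : String) :
    ∀ cs : List Char, ∀ total : Int,
    cs.foldl
      (fun total c =>
        let n : Int := PySem.Str.len s
        let st := (PySem.List.pyRange (n - 1) (-1) (-1)).foldl
          (fun (st : Int × Int × List (Int × Int)) j =>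
            if PySem.Str.pyGet? s j ≠ some c then
              (j, st.2.1 + j * (st.1 - j), (j, st.2.1 + j * (st.1 - j)) :: st.2.2)
            else (st.1, st.2.1, (st.1, st.2.1) :: st.2.2))
          (n, 0, [])
        (PySem.List.pyRange 0 n 1).foldl
          (fun total i =>
            if PySem.Str.pyGet? s i = some c then
              let r := (PySem.List.pyGet? st.2.2 i).getD (0, 0)
              total + (r.2 - i * (n - r.1))
            else total)
          total)
      total
    = total + (cs.map (fun c => ∑ i ∈ Finset.range s.toList.length,
        (if pvGet s.toList i = c then pvW s.toList (pvGet s.toList i) (i : Int) i else 0))).sum := by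
  intro cs
  induction cs with
  | nil => intro total; simp
  | cons c cs ih =>
    intro total
    rw [List.foldl_cons, ih]
    have h := pvPerChar s c total
    dsimp only at h
    rw [h, List.map_cons, List.sum_cons]
    ring

theorem pvRegroup (l : List Char) (cs : List Char) (hnd : cs.Nodup)
    (hmem : ∀ i, i < l.length → pvGet l i ∈ cs) (f : Nat → Int) :
    (cs.map (fun c => ∑ i ∈ Finset.range l.length, (if pvGet l i = c then f i else 0))).sum
      = ∑ i ∈ Finset.range l.length, f i := by
  rw [← List.sum_toFinset _ hnd, Finset.sum_comm]
  apply Finset.sum_congr rfl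
  intro i hi
  rw [Finset.sum_ite_eq cs.toFinset (pvGet l i) (fun _ => f i),
      if_pos (List.mem_toFinset.mpr (hmem i (Finset.mem_range.mp hi)))]

theorem pvMemDedup (l : List Char) (i : Nat) (h : i < l.length) :
    pvGet l i ∈ PySem.List.dedup l := by
  rw [PySem.List.mem_dedup]
  rw [pvGet, List.getD_eq_getElem?_getD, List.getElem?_eq_getElem h]
  simp

theorem pvB_eq (s : String) :
    solution_alt s = ∑ i ∈ Finset.range s.toList.length, pvW s.toList (pvGet s.toList i) (i : Int) i := by
  unfold solution_alt
  rw [pvOuterB s (PySem.List.dedup s.toList) 0, zero_add]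
  exact pvRegroup s.toList (PySem.List.dedup s.toList) (PySem.List.nodup_dedup s.toList)
    (pvMemDedup s.toList) _

-- ===== VERDICT (by name: the statement is the Claim_ definition above) =====
theorem solution_spec : Claim_equal_solution := by
  intro s _
  unfold Spec_solution
  rw [pvA_eq, pvB_eq]
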